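-- pv_equiv track=rewrite | github.com/Xunino/Coding_daily | Processing_strings/003_toLowerCase.py | toLowerCase
-- ===== SOURCE A (Python) =====
-- def toLowerCase(s: str) -> str:
--     l = ""
--     for i in s:
--         check = ord(i)
--         if 65 <= check <= 90:
--             l += chr(check + 32)
--         else:
--             l += chr(check)
--     return l
-- ===== SOURCE B (Python) =====
-- _TABLE = str.maketrans({chr(c): chr(c + 32) for c in range(65, 91)})
--
-- def toLowerCase(s: str) -> str:
--     return s.translate(_TABLE)
-- ===== Notes on version B (the rewrite author's own statement) =====
-- stated objective: idiomatic
-- what changed: Replaces A's per-character loop with conditional arithmetic and string concatenation by a precomputed translation table (str.maketrans over codes 65-90) applied in one s.translate call.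
import Mathlib
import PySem

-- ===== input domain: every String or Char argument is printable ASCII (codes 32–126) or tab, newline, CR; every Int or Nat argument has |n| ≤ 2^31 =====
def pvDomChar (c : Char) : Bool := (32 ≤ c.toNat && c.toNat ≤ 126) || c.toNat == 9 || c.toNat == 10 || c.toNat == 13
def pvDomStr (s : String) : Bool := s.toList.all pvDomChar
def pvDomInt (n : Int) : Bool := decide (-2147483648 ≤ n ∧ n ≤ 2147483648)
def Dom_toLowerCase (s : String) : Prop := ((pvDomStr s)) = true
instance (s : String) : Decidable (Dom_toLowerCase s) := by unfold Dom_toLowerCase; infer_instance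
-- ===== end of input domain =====

-- B replaces A's per-character conditional-offset-and-concatenate loop by a precomputed
-- translation table (str.maketrans over codes 65-90) applied in one s.translate pass (idiomatic).

-- ===== PORT A =====
-- strings handled on the List Char side (PySem convention); l accumulates the built string
def toLowerCase (s : String) : String :=
  String.ofList (s.toList.foldl (fun l i =>
    let check := i.toNat
    if 65 ≤ check ∧ check ≤ 90 then l ++ [Char.ofNat (check + 32)]
    else l ++ [Char.ofNat check]) [])

-- ===== PORT B =====
-- str.maketrans({chr(c): chr(c+32) for c in range(65, 91)}) : codepoint -> replacement char
def pvLowerTable : PySem.Dict Int Char :=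
  (PySem.List.pyRange 65 91 1).foldl
    (fun d c => d.insert c (Char.ofNat (c + 32).toNat)) PySem.Dict.empty

-- s.translate(_TABLE): each char looked up by its codepoint, unchanged if absent
def toLowerCase_alt (s : String) : String :=
  String.ofList (s.toList.map (fun ch => pvLowerTable.getD (ch.toNat : Int) ch))

-- ===== PRECONDITION & SPEC =====
def Spec_toLowerCase (s : String) (out : String) : Prop := out = toLowerCase_alt s
instance (s : String) (out : String) : Decidable (Spec_toLowerCase s out) := by unfold Spec_toLowerCase; infer_instance

-- ===== CLAIM (what is proved, stated in full; the proofs are below) =====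
def Claim_equal_toLowerCase : Prop := ∀ (s : String), Dom_toLowerCase s → Spec_toLowerCase s (toLowerCase s)

-- ===== LEMMAS AND PROOFS =====

lemma pvTable_getD (n : Nat) (h : n ≤ 126) (ch : Char) :
    pvLowerTable.getD (n : Int) ch =
      if 65 ≤ n ∧ n ≤ 90 then Char.ofNat (n + 32) else ch := by
  rw [PySem.Dict.getD_eq_get?_getD]
  by_cases hn : 65 ≤ n ∧ n ≤ 90
  · obtain ⟨h1, h2⟩ := hn
    have hs : pvLowerTable.get? (n : Int) = some (Char.ofNat (n + 32)) := by
      interval_cases n <;> decide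
    simp [hs, h1, h2]
  · have hs : pvLowerTable.get? (n : Int) = none := by
      interval_cases n <;> first | (exfalso; omega) | decide
    simp [hs, hn]

lemma charDom_le (c : Char) (h : pvDomChar c = true) : c.toNat ≤ 126 := by
  simp only [pvDomChar, Bool.or_eq_true, Bool.and_eq_true, decide_eq_true_eq, beq_iff_eq] at h
  omega

-- ===== VERDICT (by name: the statement is the Claim_ definition above) =====
theorem toLowerCase_spec : Claim_equal_toLowerCase := by
  intro s hdom
  unfold Spec_toLowerCase toLowerCase toLowerCase_alt
  have hall : ∀ c ∈ s.toList, pvDomChar c = true := by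
    simpa [Dom_toLowerCase, pvDomStr, List.all_eq_true] using hdom
  have hbody : (fun (l : List Char) (i : Char) =>
      let check := i.toNat
      if 65 ≤ check ∧ check ≤ 90 then l ++ [Char.ofNat (check + 32)]
      else l ++ [Char.ofNat check]) =
      fun l i => l ++ [if 65 ≤ i.toNat ∧ i.toNat ≤ 90 then Char.ofNat (i.toNat + 32)
                       else Char.ofNat i.toNat] := by
    funext l i
    by_cases hc : 65 ≤ i.toNat ∧ i.toNat ≤ 90 <;> simp [hc]
  rw [hbody, PySem.List.foldl_append_singleton_eq_map, List.nil_append]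
  congr 1
  apply List.map_congr_left
  intro c hc
  have hle : c.toNat ≤ 126 := charDom_le c (hall c hc)
  rw [pvTable_getD c.toNat hle c, Char.ofNat_toNat c]
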